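-- pv_equiv track=rewrite | github.com/inclement/lapidary-ai | splendor/game.py | discard_to_n_gems
-- ===== SOURCE A (Python) =====
-- def discard_to_n_gems(gems, target, current_possibility={}, possibilities=None, colours=['white', 'blue', 'green', 'red', 'black']):
--     if possibilities is None:
--         return discard_to_n_gems(gems, target, current_possibility, colours=colours, possibilities=[])
--     num_gems = sum(gems.values())
--
--     if num_gems == target:
--         possibilities.append(current_possibility)
--         return possibilities
--     if not colours:
--         return possibilities
--     assert num_gems >= target
--
--     orig_current_possibility = {c: n for c, n in current_possibility.items()}
--
--     colours = colours[:]
--     colour = colours.pop()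
--
--     num_gems_of_colour = gems.get(colour, 0)
--     for i in range(0, min(num_gems_of_colour, num_gems - target) + 1):
--         current_gems = {c: n for c, n in gems.items()}
--         current_gems[colour] -= i
--         current_possibility = {c: n for c, n in orig_current_possibility.items()}
--         current_possibility[colour] = -1 * i
--         discard_to_n_gems(current_gems, target,
--                           current_possibility=current_possibility,
--                           possibilities=possibilities,
--                           colours=colours)
--
--     return possibilities
-- ===== SOURCE B (Python) =====
-- def discard_to_n_gems(gems, target, current_possibility={}, possibilities=None, colours=['white', 'blue', 'green', 'red', 'black']):
--     if possibilities is None: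
--         possibilities = []
--     stack = [(gems, current_possibility, colours)]
--     while stack:
--         cur_gems, cur_poss, cols = stack.pop()
--         num_gems = sum(cur_gems.values())
--         if num_gems == target:
--             possibilities.append(cur_poss)
--             continue
--         if not cols:
--             continue
--         assert num_gems >= target
--         colour = cols[-1]
--         rest = cols[:-1]
--         # push i = top .. 0 so the i = 0 child is popped first (pre-order, A's order)
--         for i in range(min(cur_gems.get(colour, 0), num_gems - target), -1, -1):
--             child_gems = dict(cur_gems)
--             child_gems[colour] -= i
--             child_poss = dict(cur_poss)
--             child_poss[colour] = -i
--             stack.append((child_gems, child_poss, rest))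
--     return possibilities
-- ===== Notes on version B (the rewrite author's own statement) =====
-- stated objective: alternative
-- what changed: A's recursive enumeration (restart-with-[] plus a for-loop of recursive calls per colour) is replaced by an iterative depth-first search over an explicit stack of (gems, possibility, remaining-colours) states, pushing children high-to-low so pop order reproduces A's pre-order output exactly.
import Mathlib
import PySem

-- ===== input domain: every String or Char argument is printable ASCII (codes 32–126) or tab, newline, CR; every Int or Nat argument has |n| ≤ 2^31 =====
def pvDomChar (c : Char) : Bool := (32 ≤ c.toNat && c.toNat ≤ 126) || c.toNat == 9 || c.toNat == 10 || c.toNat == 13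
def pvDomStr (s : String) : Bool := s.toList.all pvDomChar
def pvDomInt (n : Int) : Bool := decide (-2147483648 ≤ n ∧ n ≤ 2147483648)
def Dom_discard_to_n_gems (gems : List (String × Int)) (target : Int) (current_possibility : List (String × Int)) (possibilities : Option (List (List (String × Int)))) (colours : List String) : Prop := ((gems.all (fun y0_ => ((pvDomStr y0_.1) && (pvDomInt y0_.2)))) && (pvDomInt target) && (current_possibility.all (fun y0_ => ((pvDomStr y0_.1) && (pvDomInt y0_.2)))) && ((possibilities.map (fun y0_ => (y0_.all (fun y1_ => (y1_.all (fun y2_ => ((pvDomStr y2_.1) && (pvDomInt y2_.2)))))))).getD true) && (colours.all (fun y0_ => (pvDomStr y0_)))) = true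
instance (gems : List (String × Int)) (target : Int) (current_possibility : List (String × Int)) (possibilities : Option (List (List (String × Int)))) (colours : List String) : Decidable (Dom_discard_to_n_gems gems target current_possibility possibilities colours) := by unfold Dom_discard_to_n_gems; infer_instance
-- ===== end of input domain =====

-- B replaces A's recursion by an iterative DFS over an explicit stack of (gems, possibility, colours)
-- states (objective: alternative decomposition, same cost). Both versions append into the caller's
-- `possibilities` list when one is passed (same in-place side effect); equivalence is about the return value.
-- B keeps A's `assert num_gems >= target` invariant and A's plain `d[colour] -= i` write, so it
-- raises exactly where A does (outside Pre_; the ports are total there and provably equal everywhere).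
-- The inputs are Python dicts (unique keys), so dict copy/lookup/assignment is ported by hand as
-- first-match association-list operations (exact on unique-key lists): pvGet = d.get(c, 0),
-- pvAssign = copy-then-assign d[c] = v.

-- shared dict helpers (both Pythons use the same dict primitives)
def pvGet : List (String × Int) → String → Int
  | [], _ => 0
  | (k, w) :: t, c => if k == c then w else pvGet t c

def pvAssign : List (String × Int) → String → Int → List (String × Int)
  | [], c, v => [(c, v)]
  | (k, w) :: t, c, v => if k == c then (c, v) :: t else (k, w) :: pvAssign t c v

def pvSumVals (g : List (String × Int)) : Int := (g.map (fun p => p.2)).sum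

-- ===== PORT A =====
mutual
  -- the body of A once `possibilities` is a list; the assert (excluded by Pre_) is not representable
  def pvGoA (target : Int) (gems current_possibility : List (String × Int))
      (possibilities : List (List (String × Int))) (colours : List String) :
      List (List (String × Int)) :=
    let num_gems := pvSumVals gems
    if num_gems = target then possibilities ++ [current_possibility]
    else if _h : colours = [] then possibilities
    else
      let colour := colours.getLastD ""
      let colours' := colours.dropLast
      let num_gems_of_colour := pvGet gems colour
      pvGoALoop target gems current_possibility colour colours'
        (PySem.List.pyRange 0 (min num_gems_of_colour (num_gems - target) + 1) 1) possibilities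
  termination_by (colours.length, 0)
  decreasing_by
    exact Prod.Lex.left _ _ (by have := List.length_pos_iff.mpr _h; simp [List.length_dropLast]; omega)

  -- the `for i in range(...)` loop of A
  def pvGoALoop (target : Int) (gems current_possibility : List (String × Int)) (colour : String)
      (colours' : List String) (is : List Int) (possibilities : List (List (String × Int))) :
      List (List (String × Int)) :=
    match is with
    | [] => possibilities
    | i :: rest =>
      pvGoALoop target gems current_possibility colour colours' rest
        (pvGoA target (pvAssign gems colour (pvGet gems colour - i))
          (pvAssign current_possibility colour (-1 * i)) possibilities colours')
  termination_by (colours'.length, is.length)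
  decreasing_by
  · exact Prod.Lex.right _ (by simp)
  · exact Prod.Lex.right _ (by simp)
end

def discard_to_n_gems (gems : List (String × Int)) (target : Int) (current_possibility : List (String × Int)) (possibilities : Option (List (List (String × Int)))) (colours : List String) : List (List (String × Int)) :=
  match possibilities with
  | none => pvGoA target gems current_possibility [] colours
  | some ps => pvGoA target gems current_possibility ps colours

-- ===== PORT B =====
-- children pushed for one popped state: i = top, top-1, …, 0 pushed in order onto the stack
def pvChildren (gems cp : List (String × Int)) (colour : String) (restCols : List String)
    (top : Int) : List (List (String × Int) × List (String × Int) × List String) :=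
  (PySem.List.pyRange top (-1) (-1)).foldl
    (fun st i => (pvAssign gems colour (pvGet gems colour - i), pvAssign cp colour (-i), restCols) :: st) []

def pvPosSum (g : List (String × Int)) : Nat := (g.map (fun p => p.2.toNat)).sum

def pvWeight (s : List (String × Int) × List (String × Int) × List String) : Nat :=
  (pvPosSum s.1 + 2) ^ (s.2.2.length + 1)

-- termination lemmas for the stack loop (cited by pvAltLoop's decreasing_by)
theorem pvGet_toNat_le (g : List (String × Int)) (c : String) :
    (pvGet g c).toNat ≤ pvPosSum g := by
  induction g with
  | nil => simp [pvGet, pvPosSum]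
  | cons p t ih =>
    obtain ⟨k, w⟩ := p
    by_cases h : k == c <;> simp [pvGet, pvPosSum, h] at * <;> omega

theorem pvPosSum_assign_le (g : List (String × Int)) (c : String) (v : Int)
    (h0 : 0 ≤ v) (hv : v ≤ pvGet g c) : pvPosSum (pvAssign g c v) ≤ pvPosSum g := by
  induction g with
  | nil =>
    simp [pvGet] at hv
    simp [pvAssign, pvPosSum]
    omega
  | cons p t ih =>
    obtain ⟨k, w⟩ := p
    by_cases h : k == c <;> simp [pvGet, pvAssign, pvPosSum, h] at * <;> omega

theorem pvFoldl_cons_rev {α β : Type} (f : α → β) (l : List α) (init : List β) :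
    l.foldl (fun st i => f i :: st) init = (l.map f).reverse ++ init := by
  induction l generalizing init with
  | nil => simp
  | cons x xs ih => simp [List.foldl_cons, ih]

theorem pvChildren_eq (gems cp : List (String × Int)) (colour : String)
    (restCols : List String) (top : Int) :
    pvChildren gems cp colour restCols top
      = (PySem.List.pyRange 0 (top + 1) 1).map
          (fun i => (pvAssign gems colour (pvGet gems colour - i), pvAssign cp colour (-i), restCols)) := by
  unfold pvChildren
  rw [pvFoldl_cons_rev, PySem.List.pyRange_neg_one_eq_reverse]
  simp

theorem pvChildren_weight_lt (gems cp : List (String × Int)) (colour : String)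
    (cols : List String) (hne : cols ≠ []) (top : Int) (htop : top ≤ pvGet gems colour) :
    ((pvChildren gems cp colour cols.dropLast top).map pvWeight).sum
      < pvWeight (gems, cp, cols) := by
  rw [pvChildren_eq]
  have hlen1 : cols.dropLast.length + 1 = cols.length := by
    have := List.length_pos_iff.mpr hne
    simp [List.length_dropLast]; omega
  have hbound : ∀ x ∈ ((PySem.List.pyRange 0 (top + 1) 1).map
      (fun i => (pvAssign gems colour (pvGet gems colour - i), pvAssign cp colour (-i), cols.dropLast))).map pvWeight,
      x ≤ (pvPosSum gems + 2) ^ (cols.dropLast.length + 1) := by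
    intro x hx
    simp only [List.map_map, List.mem_map] at hx
    obtain ⟨i, hi, rfl⟩ := hx
    rw [PySem.List.mem_pyRange_one] at hi
    simp only [Function.comp, pvWeight]
    apply Nat.pow_le_pow_left
    have hle : pvPosSum (pvAssign gems colour (pvGet gems colour - i)) ≤ pvPosSum gems :=
      pvPosSum_assign_le _ _ _ (by omega) (by omega)
    omega
  calc ((( PySem.List.pyRange 0 (top + 1) 1).map _).map pvWeight).sum
      ≤ (((PySem.List.pyRange 0 (top + 1) 1).map _).map pvWeight).length
          • ((pvPosSum gems + 2) ^ (cols.dropLast.length + 1)) := List.sum_le_card_nsmul _ _ hbound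
    _ < pvWeight (gems, cp, cols) := by
        simp only [List.length_map, PySem.List.length_pyRange_one, smul_eq_mul, pvWeight]
        rw [← hlen1]
        have hcnt : (top + 1 - 0).toNat ≤ pvPosSum gems + 1 := by
          have := pvGet_toNat_le gems colour
          omega
        have hpow : 0 < (pvPosSum gems + 2) ^ (cols.dropLast.length + 1) := pow_pos (by omega) _
        calc (top + 1 - 0).toNat * (pvPosSum gems + 2) ^ (cols.dropLast.length + 1)
            ≤ (pvPosSum gems + 1) * (pvPosSum gems + 2) ^ (cols.dropLast.length + 1) :=
              Nat.mul_le_mul_right _ hcnt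
          _ < (pvPosSum gems + 2) * (pvPosSum gems + 2) ^ (cols.dropLast.length + 1) :=
              Nat.mul_lt_mul_of_lt_of_le (by omega) (le_refl _) hpow
          _ = (pvPosSum gems + 2) ^ (cols.dropLast.length + 1 + 1) := by ring

-- the while-loop of B: pop a state, expand or record it
def pvAltLoop (target : Int)
    (stack : List (List (String × Int) × List (String × Int) × List String))
    (possibilities : List (List (String × Int))) : List (List (String × Int)) :=
  match stack with
  | [] => possibilities
  | (gems, cp, cols) :: rest =>
    let num_gems := pvSumVals gems
    if num_gems = target then pvAltLoop target rest (possibilities ++ [cp])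
    else if _h : cols = [] then pvAltLoop target rest possibilities
    else
      pvAltLoop target
        (pvChildren gems cp (cols.getLastD "") cols.dropLast
            (min (pvGet gems (cols.getLastD "")) (num_gems - target)) ++ rest)
        possibilities
  termination_by (stack.map pvWeight).sum
  decreasing_by
  · have h0 : 0 < pvWeight (gems, cp, cols) := pow_pos (by omega) _
    simp only [List.map_cons, List.sum_cons]
    omega
  · have h0 : 0 < pvWeight (gems, cp, cols) := pow_pos (by omega) _
    simp only [List.map_cons, List.sum_cons]
    omega
  · have h := pvChildren_weight_lt gems cp (cols.getLastD "") cols _h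
      (min (pvGet gems (cols.getLastD "")) (pvSumVals gems - target)) (min_le_left _ _)
    simp only [List.map_cons, List.map_append, List.sum_cons, List.sum_append]
    omega

def discard_to_n_gems_alt (gems : List (String × Int)) (target : Int) (current_possibility : List (String × Int)) (possibilities : Option (List (List (String × Int)))) (colours : List String) : List (List (String × Int)) :=
  let poss := match possibilities with
    | none => []
    | some ps => ps
  pvAltLoop target [(gems, current_possibility, colours)] poss

-- ===== PRECONDITION & SPEC =====
-- Pre_ excludes exactly the inputs where the Python A raises: AssertionError when the gem total is
-- below target with colours still left, and KeyError when, walking colours from the END (A pops from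
-- the end), a colour absent from gems is reached before a negative gem count empties A's loop and
-- stops the recursion.  Closed form: colours (reversed) are all keys of gems, or some position j has
-- a negative count and every colour up to j is a key.
def Pre_discard_to_n_gems (gems : List (String × Int)) (target : Int) (current_possibility : List (String × Int)) (possibilities : Option (List (List (String × Int)))) (colours : List String) : Prop :=
  colours = [] ∨ (gems.map (fun p => p.2)).sum = target ∨
    (target < (gems.map (fun p => p.2)).sum ∧
      ((∀ c ∈ colours, c ∈ gems.map (fun p => p.1)) ∨
        ∃ j ∈ List.range colours.reverse.length,
          ((List.lookup (colours.reverse.getD j "") gems).getD 0 < 0 ∧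
            ∀ c ∈ colours.reverse.take (j + 1), c ∈ gems.map (fun p => p.1))))
instance (gems : List (String × Int)) (target : Int) (current_possibility : List (String × Int)) (possibilities : Option (List (List (String × Int)))) (colours : List String) : Decidable (Pre_discard_to_n_gems gems target current_possibility possibilities colours) := by unfold Pre_discard_to_n_gems; infer_instance

def pvWitness_discard_to_n_gems : (List (String × Int)) × Int × (List (String × Int)) × (Option (List (List (String × Int)))) × List String :=
  ([("white", 2), ("blue", 1)], 1, [], none, ["white", "blue"])

def Spec_discard_to_n_gems (gems : List (String × Int)) (target : Int) (current_possibility : List (String × Int)) (possibilities : Option (List (List (String × Int)))) (colours : List String) (out : List (List (String × Int))) : Prop := out = discard_to_n_gems_alt gems target current_possibility possibilities colours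
instance (gems : List (String × Int)) (target : Int) (current_possibility : List (String × Int)) (possibilities : Option (List (List (String × Int)))) (colours : List String) (out : List (List (String × Int))) : Decidable (Spec_discard_to_n_gems gems target current_possibility possibilities colours out) := by unfold Spec_discard_to_n_gems; infer_instance

-- ===== CLAIM (what is proved, stated in full; the proofs are below) =====
def Claim_equal_discard_to_n_gems : Prop := ∀ (gems : List (String × Int)) (target : Int) (current_possibility : List (String × Int)) (possibilities : Option (List (List (String × Int)))) (colours : List String), Dom_discard_to_n_gems gems target current_possibility possibilities colours → Pre_discard_to_n_gems gems target current_possibility possibilities colours → Spec_discard_to_n_gems gems target current_possibility possibilities colours (discard_to_n_gems gems target current_possibility possibilities colours)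

-- ===== LEMMAS AND PROOFS =====

-- one stack state processed to completion equals one recursive call of A
theorem pv_sim (target : Int) : ∀ (n : Nat) (cols : List String), cols.length ≤ n →
    ∀ (gems cp : List (String × Int)) rest poss,
      pvAltLoop target ((gems, cp, cols) :: rest) poss
        = pvAltLoop target rest (pvGoA target gems cp poss cols) := by
  intro n
  induction n with
  | zero =>
    intro cols hlen gems cp rest poss
    have hc : cols = [] := List.length_eq_zero_iff.mp (Nat.le_zero.mp hlen)
    subst hc
    rw [pvAltLoop, pvGoA]
    split_ifs <;> simp_all  
  | succ n ih =>
    intro cols hlen gems cp rest poss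
    rw [pvAltLoop, pvGoA]
    by_cases h1 : pvSumVals gems = target
    · simp only [h1, if_true]
    · simp only [h1, if_false]
      by_cases h2 : cols = []
      · simp [h2]
      · simp only [dif_neg h2]
        rw [pvChildren_eq]
        have hlen' : cols.dropLast.length ≤ n := by
          have := List.length_pos_iff.mpr h2
          simp [List.length_dropLast] at *
          omega
        -- inner induction over the range list
        suffices H : ∀ (is : List Int) rest poss,
            pvAltLoop target
              ((is.map (fun i => (pvAssign gems (cols.getLastD "") (pvGet gems (cols.getLastD "") - i),
                  pvAssign cp (cols.getLastD "") (-i), cols.dropLast))) ++ rest) poss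
              = pvAltLoop target rest
                  (pvGoALoop target gems cp (cols.getLastD "") cols.dropLast is poss) by
          have := H (PySem.List.pyRange 0 (min (pvGet gems (cols.getLastD "")) (pvSumVals gems - target) + 1) 1) rest poss
          simpa using this
        intro is
        induction is with
        | nil => intro rest poss; simp [pvGoALoop]
        | cons i is ihis =>
          intro rest poss
          rw [List.map_cons, List.cons_append, ih cols.dropLast hlen', ihis]
          rw [pvGoALoop]
          have : -1 * i = -i := by ring
          rw [this]

theorem pv_ports_eq (gems : List (String × Int)) (target : Int)
    (current_possibility : List (String × Int))
    (possibilities : Option (List (List (String × Int)))) (colours : List String) :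
    discard_to_n_gems gems target current_possibility possibilities colours
      = discard_to_n_gems_alt gems target current_possibility possibilities colours := by
  unfold discard_to_n_gems discard_to_n_gems_alt
  cases possibilities with
  | none =>
    rw [pv_sim target colours.length colours (le_refl _) gems current_possibility [] []]
    rw [pvAltLoop]
  | some ps =>
    rw [pv_sim target colours.length colours (le_refl _) gems current_possibility [] ps]
    rw [pvAltLoop]

-- ===== VERDICT (by name: the statement is the Claim_ definition above) =====
theorem discard_to_n_gems_spec : Claim_equal_discard_to_n_gems := by
  intro gems target cp poss colours _hdom _hpre
  unfold Spec_discard_to_n_gems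
  exact pv_ports_eq gems target cp poss colours
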